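-- pv_equiv track=rewrite | github.com/dev-diver/bojhub | 백준/Silver/20125. 쿠키의 신체 측정/쿠키의 신체 측정.py | findStar
-- ===== SOURCE A (Python) =====
-- def findStar(S):
--
--   i = S.find("*")
--   if(i==-1):
--     return (-1,0)
--   cnt=1
--   for j in range(i+1,len(S)):
--     if(S[j]=="_"):
--       break
--     cnt+=1
--   return (i+1,cnt)
-- ===== SOURCE B (Python) =====
-- def findStar(S):
--   i = S.find("*")
--   if i == -1:
--     return (-1, 0)
--   j = S.find("_", i)
--   cnt = (len(S) if j == -1 else j) - i
--   return (i + 1, cnt)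
-- ===== Notes on version B (the rewrite author's own statement) =====
-- stated objective: idiomatic
-- what changed: The explicit counting loop over the characters after the star is replaced by a second string search (find of the next underscore starting at the star) plus arithmetic: the run length is the gap between the star position and the first following underscore, or end of string if there is none; B keeps no running counter and has no loop.
import Mathlib
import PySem

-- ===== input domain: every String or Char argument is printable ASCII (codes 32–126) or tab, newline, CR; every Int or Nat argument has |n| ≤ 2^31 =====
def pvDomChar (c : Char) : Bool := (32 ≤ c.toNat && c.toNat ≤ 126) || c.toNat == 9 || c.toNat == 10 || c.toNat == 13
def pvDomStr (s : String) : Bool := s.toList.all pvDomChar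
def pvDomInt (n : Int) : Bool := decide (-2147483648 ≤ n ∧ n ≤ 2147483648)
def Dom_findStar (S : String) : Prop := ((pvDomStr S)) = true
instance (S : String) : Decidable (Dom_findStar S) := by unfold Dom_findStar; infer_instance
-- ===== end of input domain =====

-- B replaces A's counting loop by a second string search plus arithmetic (idiomatic; same O(n) cost).

-- ===== PORT A =====
-- the 'for j in range(i+1, len(S)) … break' loop; range indices are always in range, so
-- direct list indexing is exact here
def findStarLoop (l : List Char) (j : Nat) (cnt : Int) : Int :=
  if h : j < l.length then
    if l[j] = '_' then cnt else findStarLoop l (j + 1) (cnt + 1)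
  else cnt
termination_by l.length - j

def findStar (S : String) : Int × Int :=
  let i := PySem.Str.find S "*"
  if i = -1 then (-1, 0)
  else (i + 1, findStarLoop S.toList (i.toNat + 1) 1)

-- ===== PORT B =====
def findStar_alt (S : String) : Int × Int :=
  let i := PySem.Str.find S "*"
  if i = -1 then (-1, 0)
  else
    let j := PySem.Str.findFrom S "_" i none
    (i + 1, (if j = -1 then (PySem.Str.len S : Int) else j) - i)

-- ===== PRECONDITION & SPEC =====
def Spec_findStar (S : String) (out : Int × Int) : Prop := out = findStar_alt S
instance (S : String) (out : Int × Int) : Decidable (Spec_findStar S out) := by unfold Spec_findStar; infer_instance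

-- ===== CLAIM (what is proved, stated in full; the proofs are below) =====
def Claim_equal_findStar : Prop := ∀ (S : String), Dom_findStar S → Spec_findStar S (findStar S)

-- ===== LEMMAS AND PROOFS =====

-- [c] is a prefix of l.drop i exactly when l[i]? = some c
lemma singl_prefix_drop (c : Char) (l : List Char) (i : Nat) :
    [c] <+: l.drop i ↔ l[i]? = some c := by
  rw [← List.head?_drop]
  constructor
  · rintro ⟨t, ht⟩
    simp [← ht]
  · intro h
    cases hd : l.drop i with
    | nil => simp [hd] at h
    | cons a t =>
      simp [hd] at h
      exact ⟨t, by simp [h]⟩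

-- A's loop counts the characters of l.drop j before the first '_'
lemma findStarLoop_eq (l : List Char) (j : Nat) (cnt : Int) :
    findStarLoop l j cnt = cnt + (((l.drop j).takeWhile (· != '_')).length : Int) := by
  by_cases h : j < l.length
  · rw [findStarLoop]
    have hdrop : l.drop j = l[j] :: l.drop (j + 1) := List.drop_eq_getElem_cons h
    by_cases hc : l[j] = '_'
    · simp [h, hc, hdrop]
    · have := findStarLoop_eq l (j + 1) (cnt + 1)
      simp only [h, dif_pos, if_neg hc, this, hdrop]
      rw [List.takeWhile_cons_of_pos (by simp [hc])]
      simp only [List.length_cons]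
      push_cast
      omega
  · rw [findStarLoop]
    simp [h, List.drop_eq_nil_of_le (Nat.le_of_not_lt h)]
termination_by l.length - j

lemma takeWhile_len_of_first (d : List Char) (k : Nat)
    (h1 : d[k]? = some '_') (h2 : ∀ i < k, d[i]? ≠ some '_') :
    (d.takeWhile (· != '_')).length = k := by
  induction d generalizing k with
  | nil => simp at h1
  | cons c rest ih =>
    cases k with
    | zero =>
      simp at h1
      simp [h1]
    | succ k' =>
      have hc : c ≠ '_' := by
        intro hc; exact h2 0 (Nat.succ_pos _) (by simp [hc])
      rw [List.takeWhile_cons_of_pos (by simp [hc])]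
      simp only [List.length_cons]
      have := ih k' (by simpa using h1) (fun i hi => by
        have := h2 (i + 1) (by omega); simpa using this)
      omega

lemma takeWhile_of_not_mem (d : List Char) (h : '_' ∉ d) :
    d.takeWhile (· != '_') = d := by
  induction d with
  | nil => rfl
  | cons c rest ih =>
    have hc : c ≠ '_' := fun hc => h (by simp [hc])
    rw [List.takeWhile_cons_of_pos (by simp [hc])]
    simp [ih (fun hm => h (List.mem_cons_of_mem _ hm))]

-- characterisation of find d ['_'] via takeWhile
lemma find_underscore (d : List Char) :
    PySem.Chars.find d ['_'] =
      if '_' ∈ d then ((d.takeWhile (· != '_')).length : Int) else -1 := by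
  by_cases h : '_' ∈ d
  · obtain ⟨s, t, hst⟩ := List.append_of_mem h
    have hinf : ['_'] <:+: d := ⟨s, t, by simp [hst]⟩
    have hpos : 0 ≤ PySem.Chars.find d ['_'] := (PySem.Chars.find_nonneg_iff d ['_']).2 hinf
    obtain ⟨hpre, hfirst⟩ := PySem.Chars.find_spec hpos
    have h1 : d[(PySem.Chars.find d ['_']).toNat]? = some '_' :=
      (singl_prefix_drop '_' d _).1 hpre
    have h2 : ∀ i < (PySem.Chars.find d ['_']).toNat, d[i]? ≠ some '_' := by
      intro i hi hc
      exact hfirst i hi ((singl_prefix_drop '_' d i).2 hc)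
    rw [if_pos h, takeWhile_len_of_first d _ h1 h2]
    omega
  · rw [if_neg h]
    refine (PySem.Chars.find_eq_neg_one_iff d ['_']).2 ?_
    intro hinf
    exact h (hinf.subset (by simp))

theorem findStar_spec : Claim_equal_findStar := by
  intro S _
  unfold Spec_findStar findStar findStar_alt
  simp only []
  by_cases h1 : PySem.Str.find S "*" = -1
  · simp only [h1]
    norm_num
  · set i := PySem.Str.find S "*" with hi
    have hfind : i = PySem.Chars.find S.toList ['*'] := by
      rw [hi, PySem.Str.find_eq]; rfl
    have hge : -1 ≤ i := hfind ▸ PySem.Chars.neg_one_le_find S.toList ['*']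
    have hpos : 0 ≤ i := by omega
    set k := i.toNat with hk
    have hik : i = (k : Int) := by omega
    obtain ⟨hpre, _⟩ := PySem.Chars.find_spec (hfind ▸ hpos)
    have hstar : S.toList[k]? = some '*' := by
      apply (singl_prefix_drop '*' S.toList k).1
      rw [hk, hfind]; exact hpre
    have hklen : k < S.toList.length := by
      by_contra hc
      rw [List.getElem?_eq_none (Nat.le_of_not_lt hc)] at hstar
      simp at hstar
    have hgk : S.toList[k] = '*' := by
      rw [List.getElem?_eq_getElem hklen] at hstar
      exact Option.some.inj hstar
    have hdropk : S.toList.drop k = '*' :: S.toList.drop (k + 1) := by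
      rw [List.drop_eq_getElem_cons hklen, hgk]
    have hff : PySem.Str.findFrom S "_" i none =
        if PySem.Chars.find (S.toList.drop k) ['_'] = -1 then -1
        else (k : Int) + PySem.Chars.find (S.toList.drop k) ['_'] := by
      rw [PySem.Str.findFrom_eq, hik]
      exact_mod_cast PySem.Chars.findFrom_natCast S.toList "_".toList k (Nat.le_of_lt hklen)
    have hmem : ('_' ∈ S.toList.drop k) ↔ ('_' ∈ S.toList.drop (k + 1)) := by
      rw [hdropk]; simp
    have hloop := findStarLoop_eq S.toList (k + 1) 1
    have hfu := find_underscore (S.toList.drop k)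
    have htw : (S.toList.drop k).takeWhile (· != '_') =
        '*' :: ((S.toList.drop (k + 1)).takeWhile (· != '_')) := by
      rw [hdropk, List.takeWhile_cons_of_pos (by decide)]
    simp only [if_neg h1]
    refine Prod.ext rfl ?_
    show findStarLoop S.toList (i.toNat + 1) 1 = _
    rw [← hk, hloop, hff]
    have hlen : PySem.Str.len S = (S.toList.length : Int) := by
      simp [PySem.Str.len_eq]
    rw [hlen, hik]
    by_cases hm : '_' ∈ S.toList.drop (k + 1)
    · have hfval : PySem.Chars.find (S.toList.drop k) ['_'] =
          (((S.toList.drop (k + 1)).takeWhile (· != '_')).length : Int) + 1 := by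
        rw [hfu, if_pos (hmem.2 hm), htw]
        push_cast [List.length_cons]
        ring
      rw [hfval]
      split_ifs <;> push_cast at * <;> omega
    · have hfval : PySem.Chars.find (S.toList.drop k) ['_'] = -1 := by
        rw [hfu, if_neg (fun hc => hm (hmem.1 hc))]
      have hdlen : ((S.toList.drop (k + 1)).takeWhile (· != '_')).length =
          S.toList.length - (k + 1) := by
        rw [takeWhile_of_not_mem _ hm, List.length_drop]
      rw [hfval]
      norm_num
      rw [hdlen]
      have hS : S.toList.length = S.length := by simp
      omega
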